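-- pv_equiv track=rewrite | github.com/rpiasentin/safety-monitor | main.py | _decorate_lock_devices
-- ===== SOURCE A (Python) =====
-- def _decorate_lock_devices(lock_devices: list[dict]) -> tuple[list[dict], dict]:
--     decorated = []
--     counts = {"locked": 0, "unlocked": 0, "other": 0}
--     for lock in (lock_devices or []):
--         row = dict(lock)
--         state = str(row.get("state") or "unknown").strip().lower()
--         if state == "locked":
--             status = "good"
--             state_label = "Locked"
--             counts["locked"] += 1
--         elif state == "unlocked":
--             status = "critical"
--             state_label = "Unlocked"
--             counts["unlocked"] += 1
--         elif state in {"locking", "unlocking"}: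
--             status = "warning"
--             state_label = state.title()
--             counts["other"] += 1
--         else:
--             status = "unknown"
--             state_label = state.replace("_", " ").title() if state else "Unknown"
--             counts["other"] += 1
--         row["status"] = status
--         row["state_label"] = state_label
--         decorated.append(row)
--     return decorated, counts
-- ===== SOURCE B (Python) =====
-- # B: dispatch-table classification + counts derived by counting buckets (no running counter, no branch chain)
--
-- _KNOWN = {
--     "locked": ("good", "Locked", "locked"),
--     "unlocked": ("critical", "Unlocked", "unlocked"),
--     "locking": ("warning", "Locking", "other"),
--     "unlocking": ("warning", "Unlocking", "other"),
-- }
--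
--
-- def _classify(lock):
--     state = str(dict(lock).get("state") or "unknown").strip().lower()
--     if state in _KNOWN:
--         return _KNOWN[state]
--     label = state.replace("_", " ").title() if state else "Unknown"
--     return ("unknown", label, "other")
--
--
-- def _decorate_lock_devices(lock_devices):
--     triples = [(dict(lock), _classify(lock)) for lock in (lock_devices or [])]
--     decorated = [{**row, "status": st, "state_label": lab} for row, (st, lab, _b) in triples]
--     buckets = [b for _row, (_st, _lab, b) in triples]
--     counts = {k: buckets.count(k) for k in ("locked", "unlocked", "other")}
--     return decorated, counts
-- ===== Notes on version B (the rewrite author's own statement) =====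
-- stated objective: idiomatic
-- what changed: Replaced A's four-way if/elif chain and running counter dict with a static dispatch table keyed by the normalized state, a map producing (row, classification) pairs, and counts obtained by counting a derived bucket list per fixed key.
import Mathlib
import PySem

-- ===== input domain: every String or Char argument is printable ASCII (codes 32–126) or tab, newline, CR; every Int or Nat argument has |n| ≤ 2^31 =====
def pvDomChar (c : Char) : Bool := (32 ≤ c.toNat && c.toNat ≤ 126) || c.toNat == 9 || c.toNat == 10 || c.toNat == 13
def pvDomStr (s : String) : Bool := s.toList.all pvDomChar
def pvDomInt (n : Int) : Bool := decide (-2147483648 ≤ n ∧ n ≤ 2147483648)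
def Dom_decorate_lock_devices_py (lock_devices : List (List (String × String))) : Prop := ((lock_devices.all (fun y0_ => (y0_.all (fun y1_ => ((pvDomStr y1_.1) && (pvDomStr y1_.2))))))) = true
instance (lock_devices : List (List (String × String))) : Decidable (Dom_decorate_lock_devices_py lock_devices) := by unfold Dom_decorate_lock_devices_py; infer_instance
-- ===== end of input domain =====

-- B replaces A's if/elif chain and running counter dict with a static dispatch table and
-- counts obtained by counting a derived bucket list (objective: idiomatic; same cost).

-- shared helpers: a hand-port of Python's str.title() (exact on the ASCII domain, where
-- 'cased' = isalpha), and the state-normalisation expression both programs share: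
-- str(row.get("state") or "unknown").strip().lower()
def pvTitleGo : Bool → List Char → List Char
  | _, [] => []
  | prev, c :: rest =>
    if PySem.Chars.isalpha c then
      (if prev then PySem.Chars.lowerChar c else PySem.Chars.upperChar c) :: pvTitleGo true rest
    else
      c :: pvTitleGo false rest

def pvTitle (s : String) : String := String.ofList (pvTitleGo false s.toList)

def pvState (row : PySem.Dict String String) : String :=
  let raw := (row.get? "state").getD ""
  PySem.Str.lower (PySem.Str.strip (if raw = "" then "unknown" else raw))

-- ===== PORT A =====
-- A's loop body, named (one iteration of 'for lock in (lock_devices or [])')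
def pvStepA (acc : (List (List (String × String))) × PySem.Dict String Int)
    (lock : List (String × String)) :
    (List (List (String × String))) × PySem.Dict String Int :=
  let row := PySem.Dict.ofList lock
  let state := pvState row
  if state = "locked" then
    (acc.1 ++ [((row.insert "status" "good").insert "state_label" "Locked").items],
     acc.2.modify "locked" 0 (· + 1))
  else if state = "unlocked" then
    (acc.1 ++ [((row.insert "status" "critical").insert "state_label" "Unlocked").items],
     acc.2.modify "unlocked" 0 (· + 1))
  else if state = "locking" ∨ state = "unlocking" then
    (acc.1 ++ [((row.insert "status" "warning").insert "state_label" (pvTitle state)).items],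
     acc.2.modify "other" 0 (· + 1))
  else
    (acc.1 ++ [((row.insert "status" "unknown").insert "state_label"
        (if state ≠ "" then pvTitle (PySem.Str.replace state "_" " ") else "Unknown")).items],
     acc.2.modify "other" 0 (· + 1))

def decorate_lock_devices_py (lock_devices : List (List (String × String))) :
    (List (List (String × String))) × (List (String × Int)) :=
  let res := lock_devices.foldl pvStepA
    (([] : List (List (String × String))),
     PySem.Dict.ofList [("locked", (0 : Int)), ("unlocked", 0), ("other", 0)])
  (res.1, res.2.items)

-- ===== PORT B =====
def pvKNOWN : PySem.Dict String (String × String × String) :=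
  PySem.Dict.ofList
    [("locked", ("good", "Locked", "locked")),
     ("unlocked", ("critical", "Unlocked", "unlocked")),
     ("locking", ("warning", "Locking", "other")),
     ("unlocking", ("warning", "Unlocking", "other"))]

def pvClassify (lock : List (String × String)) : String × String × String :=
  let state := pvState (PySem.Dict.ofList lock)
  match pvKNOWN.get? state with
  | some t => t
  | none =>
      ("unknown",
       if state ≠ "" then pvTitle (PySem.Str.replace state "_" " ") else "Unknown",
       "other")

def decorate_lock_devices_py_alt (lock_devices : List (List (String × String))) :
    (List (List (String × String))) × (List (String × Int)) :=
  let triples := lock_devices.map (fun lock => (PySem.Dict.ofList lock, pvClassify lock))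
  let decorated := triples.map (fun p =>
    ((p.1.insert "status" p.2.1).insert "state_label" p.2.2.1).items)
  let buckets := triples.map (fun p => p.2.2.2)
  (decorated,
   [("locked", (buckets.count "locked" : Int)),
    ("unlocked", (buckets.count "unlocked" : Int)),
    ("other", (buckets.count "other" : Int))])

-- ===== PRECONDITION & SPEC =====
def Spec_decorate_lock_devices_py (lock_devices : List (List (String × String))) (out : (List (List (String × String))) × (List (String × Int))) : Prop := out = decorate_lock_devices_py_alt lock_devices
instance (lock_devices : List (List (String × String))) (out : (List (List (String × String))) × (List (String × Int))) : Decidable (Spec_decorate_lock_devices_py lock_devices out) := by unfold Spec_decorate_lock_devices_py; infer_instance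

-- ===== CLAIM (what is proved, stated in full; the proofs are below) =====
def Claim_equal_decorate_lock_devices_py : Prop := ∀ (lock_devices : List (List (String × String))), Dom_decorate_lock_devices_py lock_devices → Spec_decorate_lock_devices_py lock_devices (decorate_lock_devices_py lock_devices)

-- ===== LEMMAS AND PROOFS =====

-- the decorated row and the count bucket a single element contributes, phrased via B's classifier
def pvRowOf (lock : List (String × String)) : List (String × String) :=
  (((PySem.Dict.ofList lock).insert "status" (pvClassify lock).1).insert
      "state_label" (pvClassify lock).2.1).items

def pvBucket (lock : List (String × String)) : String := (pvClassify lock).2.2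

-- A's counts dict, with its fixed key layout
def pvCDict (a b o : Int) : PySem.Dict String Int :=
  PySem.Dict.mk [("locked", a), ("unlocked", b), ("other", o)]

lemma pvKNOWN_get?_none (state : String) (h1 : state ≠ "locked") (h2 : state ≠ "unlocked")
    (h3 : state ≠ "locking") (h4 : state ≠ "unlocking") : pvKNOWN.get? state = none := by
  have h : pvKNOWN = PySem.Dict.mk
      [("locked", ("good", "Locked", "locked")),
       ("unlocked", ("critical", "Unlocked", "unlocked")),
       ("locking", ("warning", "Locking", "other")),
       ("unlocking", ("warning", "Unlocking", "other"))] := by decide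
  rw [h]
  simp [PySem.Dict.get?, Ne.symm h1, Ne.symm h2, Ne.symm h3, Ne.symm h4]

-- one A-iteration appends B's decorated row and bumps B's bucket
lemma pvStepA_eq (acc : (List (List (String × String))) × PySem.Dict String Int)
    (lock : List (String × String)) :
    pvStepA acc lock =
      (acc.1 ++ [pvRowOf lock], acc.2.modify (pvBucket lock) 0 (· + 1)) := by
  simp only [pvStepA, pvRowOf, pvBucket, pvClassify]
  generalize pvState (PySem.Dict.ofList lock) = st
  by_cases h1 : st = "locked"
  · subst h1
    rw [show pvKNOWN.get? "locked" = some ("good", "Locked", "locked") from by decide]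
    simp
  by_cases h2 : st = "unlocked"
  · subst h2
    rw [show pvKNOWN.get? "unlocked" = some ("critical", "Unlocked", "unlocked") from by decide]
    simp
  by_cases h3 : st = "locking"
  · subst h3
    rw [show pvKNOWN.get? "locking" = some ("warning", "Locking", "other") from by decide]
    simp [show pvTitle "locking" = "Locking" from by decide]
  by_cases h4 : st = "unlocking"
  · subst h4
    rw [show pvKNOWN.get? "unlocking" = some ("warning", "Unlocking", "other") from by decide]
    simp [show pvTitle "unlocking" = "Unlocking" from by decide]
  · rw [pvKNOWN_get?_none st h1 h2 h3 h4]
    simp [h1, h2, h3, h4]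

lemma pvBucket_cases (lock : List (String × String)) :
    pvBucket lock = "locked" ∨ pvBucket lock = "unlocked" ∨ pvBucket lock = "other" := by
  simp only [pvBucket, pvClassify]
  generalize pvState (PySem.Dict.ofList lock) = st
  by_cases h1 : st = "locked"
  · subst h1
    rw [show pvKNOWN.get? "locked" = some ("good", "Locked", "locked") from by decide]
    simp
  by_cases h2 : st = "unlocked"
  · subst h2
    rw [show pvKNOWN.get? "unlocked" = some ("critical", "Unlocked", "unlocked") from by decide]
    simp
  by_cases h3 : st = "locking"
  · subst h3
    rw [show pvKNOWN.get? "locking" = some ("warning", "Locking", "other") from by decide]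
    simp
  by_cases h4 : st = "unlocking"
  · subst h4
    rw [show pvKNOWN.get? "unlocking" = some ("warning", "Unlocking", "other") from by decide]
    simp
  · rw [pvKNOWN_get?_none st h1 h2 h3 h4]
    simp

lemma pvCDict_modify_locked (a b o : Int) :
    (pvCDict a b o).modify "locked" 0 (· + 1) = pvCDict (a + 1) b o := rfl
lemma pvCDict_modify_unlocked (a b o : Int) :
    (pvCDict a b o).modify "unlocked" 0 (· + 1) = pvCDict a (b + 1) o := rfl
lemma pvCDict_modify_other (a b o : Int) :
    (pvCDict a b o).modify "other" 0 (· + 1) = pvCDict a b (o + 1) := rfl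

-- invariant of A's whole loop, stated against B's map/count view
lemma pvLoopA (L : List (List (String × String))) (d : List (List (String × String)))
    (a b o : Int) :
    L.foldl pvStepA (d, pvCDict a b o) =
      (d ++ L.map pvRowOf,
       pvCDict (a + ((L.map pvBucket).count "locked" : Int))
               (b + ((L.map pvBucket).count "unlocked" : Int))
               (o + ((L.map pvBucket).count "other" : Int))) := by
  induction L generalizing d a b o with
  | nil => simp
  | cons x xs ih =>
    simp only [List.foldl_cons, pvStepA_eq]
    rcases pvBucket_cases x with hb | hb | hb <;>
      rw [hb] <;>
      [rw [pvCDict_modify_locked]; rw [pvCDict_modify_unlocked]; rw [pvCDict_modify_other]] <;>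
      rw [ih] <;>
      simp [pvCDict, hb] <;> omega

-- ===== VERDICT (by name: the statement is the Claim_ definition above) =====
theorem decorate_lock_devices_py_spec : Claim_equal_decorate_lock_devices_py := by
  intro L _
  show decorate_lock_devices_py L = decorate_lock_devices_py_alt L
  unfold decorate_lock_devices_py decorate_lock_devices_py_alt
  rw [show PySem.Dict.ofList [("locked", (0 : Int)), ("unlocked", 0), ("other", 0)] =
      pvCDict 0 0 0 from by decide]
  rw [pvLoopA]
  simp [pvCDict, List.map_map, Function.comp_def, pvRowOf,
    show pvBucket = fun x => (pvClassify x).2.2 from rfl]
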